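-- pv_equiv track=rewrite | github.com/coconuthead-Sentinel-core/Sovereign-Forge | sentinel_sync.py | _content_signature
-- ===== SOURCE A (Python) =====
-- from typing import Any, Callable, Dict, List, Optional, Tuple
--
-- def _content_signature(payload: Dict[str, Any]) -> Tuple[int, int, int, int, int]:
--     """Generate a compact glyphic signature.
--
--     Input is arbitrary agent state; we derive 5 integers (0..255) keyed to
--     (structure, logic, emotion, transform, unity). This is deterministic and
--     lightweight, inspired by the diagrams.
--     """
--
--     # Stable serialization
--     items = sorted((str(k), str(v)) for k, v in payload.items())
--     acc = [17, 31, 73, 127, 191]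
--     for i, (k, v) in enumerate(items):
--         s = f"{k}:{v}|{i}"
--         for j, ch in enumerate(s):
--             acc[j % 5] = (acc[j % 5] * 131 + ord(ch)) % 257
--     return tuple(acc)  # type: ignore[return-value]
-- ===== SOURCE B (Python) =====
-- def _content_signature(payload):
--     """Signature via five sliced character streams folded independently."""
--     items = sorted((str(k), str(v)) for k, v in payload.items())
--     streams = ["", "", "", "", ""]
--     for i, (k, v) in enumerate(items):
--         s = f"{k}:{v}|{i}"
--         for m in range(5):
--             streams[m] += s[m::5]
--     sig = []
--     for seed, stream in zip((17, 31, 73, 127, 191), streams):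
--         acc = seed
--         for ch in stream:
--             acc = (acc * 131 + ord(ch)) % 257
--         sig.append(acc)
--     return tuple(sig)
-- ===== Notes on version B (the rewrite author's own statement) =====
-- stated objective: alternative
-- what changed: A updates a mutable 5-cell accumulator indexed by j % 5 in one interleaved pass over the characters; B first extracts five per-lane character streams with slicing (s[m::5] concatenated across the sorted items) and then folds each stream independently from its seed.
import Mathlib
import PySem

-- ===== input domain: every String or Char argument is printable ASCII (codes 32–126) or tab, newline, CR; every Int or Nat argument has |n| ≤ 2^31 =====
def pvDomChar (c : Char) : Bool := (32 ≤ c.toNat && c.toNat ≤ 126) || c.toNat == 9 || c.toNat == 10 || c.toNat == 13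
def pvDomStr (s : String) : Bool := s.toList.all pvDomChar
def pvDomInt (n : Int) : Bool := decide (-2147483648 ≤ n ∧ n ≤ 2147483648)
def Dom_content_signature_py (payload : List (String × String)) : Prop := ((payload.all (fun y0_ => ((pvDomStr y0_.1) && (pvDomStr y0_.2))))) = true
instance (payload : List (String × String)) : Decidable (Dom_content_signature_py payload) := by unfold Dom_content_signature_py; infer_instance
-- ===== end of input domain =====

-- B replaces A's single interleaved pass (mutable 5-cell accumulator indexed by j % 5) with
-- slice-extracted per-lane character streams folded independently; objective: alternative decomposition.

-- ===== PORT A =====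
-- shared preparation (identical in both Pythons): sorted items of the dict, and the f-string "k:v|i"
def pvItems (payload : List (String × String)) : List (String × String) :=
  PySem.List.sorted2 (PySem.Dict.ofList payload).items (fun p => p.1) (fun p => p.2)

def pvFmt (kv : String × String) (i : Int) : List Char :=
  kv.1.toList ++ ':' :: kv.2.toList ++ '|' :: PySem.Int.toChars i

-- (acc * 131 + ord(ch)) % 257, the update both Pythons write inline
def pvStep (a : Int) (c : Char) : Int := PySem.Int.mod (a * 131 + (c.toNat : Int)) 257

-- acc[j] = f(acc[j]) on A's five-cell accumulator
def pvSet (t : Int × Int × Int × Int × Int) (j : Int) (f : Int → Int) :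
    Int × Int × Int × Int × Int :=
  if j = 0 then (f t.1, t.2.1, t.2.2.1, t.2.2.2.1, t.2.2.2.2)
  else if j = 1 then (t.1, f t.2.1, t.2.2.1, t.2.2.2.1, t.2.2.2.2)
  else if j = 2 then (t.1, t.2.1, f t.2.2.1, t.2.2.2.1, t.2.2.2.2)
  else if j = 3 then (t.1, t.2.1, t.2.2.1, f t.2.2.2.1, t.2.2.2.2)
  else (t.1, t.2.1, t.2.2.1, t.2.2.2.1, f t.2.2.2.2)

def content_signature_py (payload : List (String × String)) : Int × Int × Int × Int × Int :=
  (PySem.List.enumerate (pvItems payload) 0).foldl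
    (fun acc p =>
      (PySem.List.enumerate (pvFmt p.2 p.1) 0).foldl
        (fun acc q => pvSet acc (PySem.Int.mod q.1 5) (fun a => pvStep a q.2)) acc)
    (17, 31, 73, 127, 191)

-- ===== PORT B =====
-- s[m::5]
def pvSlice5 (cs : List Char) (m : Int) : List Char :=
  (PySem.List.slice? cs (some m) none 5).getD []

-- fold of one lane's stream from its seed
def pvLane (seed : Int) (cs : List Char) : Int := cs.foldl pvStep seed

def content_signature_py_alt (payload : List (String × String)) : Int × Int × Int × Int × Int :=
  let streams := (PySem.List.enumerate (pvItems payload) 0).foldl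
    (fun (st : List Char × List Char × List Char × List Char × List Char) p =>
      let s := pvFmt p.2 p.1
      (st.1 ++ pvSlice5 s 0, st.2.1 ++ pvSlice5 s 1, st.2.2.1 ++ pvSlice5 s 2,
       st.2.2.2.1 ++ pvSlice5 s 3, st.2.2.2.2 ++ pvSlice5 s 4))
    ([], [], [], [], [])
  (pvLane 17 streams.1, pvLane 31 streams.2.1, pvLane 73 streams.2.2.1,
   pvLane 127 streams.2.2.2.1, pvLane 191 streams.2.2.2.2)

-- ===== PRECONDITION & SPEC =====
def Spec_content_signature_py (payload : List (String × String)) (out : Int × Int × Int × Int × Int) : Prop := out = content_signature_py_alt payload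
instance (payload : List (String × String)) (out : Int × Int × Int × Int × Int) : Decidable (Spec_content_signature_py payload out) := by unfold Spec_content_signature_py; infer_instance

-- ===== CLAIM (what is proved, stated in full; the proofs are below) =====
def Claim_equal_content_signature_py : Prop := ∀ (payload : List (String × String)), Dom_content_signature_py payload → Spec_content_signature_py payload (content_signature_py payload)

-- ===== LEMMAS AND PROOFS =====

-- chars of cs at positions p (counted on from j) with (counter) % 5 = m
def pvPickP (m : Nat) : Nat → List Char → List Char
  | _, [] => []
  | j, c :: cs => if j % 5 = m then c :: pvPickP m (j + 1) cs else pvPickP m (j + 1) cs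

-- componentwise lane folds
def pvF (t : Int × Int × Int × Int × Int)
    (b : List Char × List Char × List Char × List Char × List Char) :
    Int × Int × Int × Int × Int :=
  (b.1.foldl pvStep t.1, b.2.1.foldl pvStep t.2.1, b.2.2.1.foldl pvStep t.2.2.1,
   b.2.2.2.1.foldl pvStep t.2.2.2.1, b.2.2.2.2.foldl pvStep t.2.2.2.2)

lemma pvSlice5_nil (m : Nat) : pvSlice5 [] (m : Int) = [] := by
  simp [pvSlice5, PySem.List.slice?, PySem.List.sliceIndices]

lemma pvSlice5_cons_succ (c : Char) (cs : List Char) (m : Nat) :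
    pvSlice5 (c :: cs) ((m + 1 : Nat) : Int) = pvSlice5 cs (m : Int) := by
  simp only [pvSlice5, PySem.List.slice?, PySem.List.sliceIndices]
  norm_num
  rw [if_neg (by omega : ¬ ((m:Int) + 1 < 0)), if_neg (by omega : ¬ ((m:Int) < 0))]
  have hc : (if min (m:Int) (cs.length:Int) + 1 ≤ (cs.length:Int) then
      (((cs.length:Int) + 1 - (min (m:Int) (cs.length:Int) + 1) + 5 - 1) / 5).toNat else 0)
      = (if min (m:Int) (cs.length:Int) < (cs.length:Int) then
      (((cs.length:Int) - min (m:Int) (cs.length:Int) + 5 - 1) / 5).toNat else 0) := by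
    split_ifs <;> omega
  rw [hc]
  apply List.filterMap_congr
  intro x hx
  have h1 : (min (m:Int) (cs.length:Int) + 1 + 5 * (x:Int)).toNat
      = (min (m:Int) (cs.length:Int) + 5 * (x:Int)).toNat + 1 := by omega
  rw [h1, List.getElem?_cons_succ]

lemma pvSlice5_cons_zero (c : Char) (cs : List Char) :
    pvSlice5 (c :: cs) 0 = c :: pvSlice5 cs 4 := by
  simp only [pvSlice5, PySem.List.slice?, PySem.List.sliceIndices]
  norm_num
  rw [show min (0:Int) ((cs.length:Int)+1) = 0 by omega]
  by_cases h4 : 4 < cs.length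
  · rw [if_pos h4, show min (4:Int) (cs.length:Int) = 4 by omega]
    have hc : (((cs.length:Int) + 1 - 0 + 5 - 1) / 5).toNat
        = (((cs.length:Int) - 4 + 5 - 1) / 5).toNat + 1 := by omega
    rw [hc, List.range_succ_eq_map, List.filterMap_cons, List.filterMap_map]
    simp only [show ((0:Int) + 5 * ((0:Nat):Int)).toNat = 0 by norm_num, List.getElem?_cons_zero]
    apply congrArg (c :: ·)
    apply List.filterMap_congr
    intro x hx
    have h1 : ((0:Int) + 5 * ((x:Int) + 1)).toNat = ((4:Int) + 5 * (x:Int)).toNat + 1 := by omega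
    simp only [Function.comp, Nat.succ_eq_add_one]
    push_cast
    rw [h1, List.getElem?_cons_succ]
  · rw [if_neg h4]
    have hc : (((cs.length:Int) + 1 - 0 + 5 - 1) / 5).toNat = 1 := by omega
    rw [hc]
    simp [List.range_succ]

-- pvPickP in terms of slices (counter j, lane m)
lemma pvPickP_eq_slice (cs : List Char) (m : Nat) (hm : m < 5) : ∀ (j : Nat),
    pvPickP m j cs = pvSlice5 cs (((m + 5 - j % 5) % 5 : Nat) : Int) := by
  induction cs with
  | nil => intro j; rw [pvPickP, pvSlice5_nil]
  | cons c cs ih =>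
    intro j
    rw [pvPickP]
    by_cases h : j % 5 = m
    · rw [if_pos h]
      rw [ih (j + 1)]
      rw [show (m + 5 - j % 5) % 5 = 0 by omega]
      rw [show (m + 5 - (j + 1) % 5) % 5 = 4 by omega]
      exact (pvSlice5_cons_zero c cs).symm
    · rw [if_neg h]
      rw [ih (j + 1)]
      have h1 : (m + 5 - j % 5) % 5 = ((m + 5 - (j + 1) % 5) % 5) + 1 := by omega
      rw [h1]
      exact (pvSlice5_cons_succ c cs _).symm

-- A's inner character loop computes the five lane folds of the pvPickP streams
lemma pvInner_eq (cs : List Char) : ∀ (j : Nat) (t : Int × Int × Int × Int × Int),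
    (PySem.List.enumerate cs (j : Int)).foldl
        (fun acc q => pvSet acc (PySem.Int.mod q.1 5) (fun a => pvStep a q.2)) t
      = pvF t (pvPickP 0 j cs, pvPickP 1 j cs, pvPickP 2 j cs, pvPickP 3 j cs, pvPickP 4 j cs) := by
  induction cs with
  | nil => intro j t; simp [PySem.List.enumerate_nil, pvPickP, pvF]
  | cons c cs ih =>
    intro j t
    rw [PySem.List.enumerate_cons, List.foldl_cons]
    rw [show (j : Int) + 1 = ((j + 1 : Nat) : Int) by push_cast; ring]
    rw [ih (j + 1)]
    have hmod : PySem.Int.mod (j : Int) 5 = ((j % 5 : Nat) : Int) := by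
      exact_mod_cast PySem.Int.mod_natCast j 5
    rw [hmod]
    have h5 : j % 5 = 0 ∨ j % 5 = 1 ∨ j % 5 = 2 ∨ j % 5 = 3 ∨ j % 5 = 4 := by omega
    rcases h5 with h | h | h | h | h <;>
      simp [h, pvSet, pvF, pvPickP]

-- shifting the stream accumulator out of B's item loop
lemma pvStreams_shift (l : List (Int × (String × String))) :
    ∀ (st : List Char × List Char × List Char × List Char × List Char),
    l.foldl (fun (st : List Char × List Char × List Char × List Char × List Char) p =>
        let s := pvFmt p.2 p.1
        (st.1 ++ pvSlice5 s 0, st.2.1 ++ pvSlice5 s 1, st.2.2.1 ++ pvSlice5 s 2,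
         st.2.2.2.1 ++ pvSlice5 s 3, st.2.2.2.2 ++ pvSlice5 s 4)) st
      = (st.1 ++ (l.foldl (fun (st : List Char × List Char × List Char × List Char × List Char) p =>
          let s := pvFmt p.2 p.1
          (st.1 ++ pvSlice5 s 0, st.2.1 ++ pvSlice5 s 1, st.2.2.1 ++ pvSlice5 s 2,
           st.2.2.2.1 ++ pvSlice5 s 3, st.2.2.2.2 ++ pvSlice5 s 4)) ([], [], [], [], [])).1,
         st.2.1 ++ (l.foldl (fun (st : List Char × List Char × List Char × List Char × List Char) p =>
          let s := pvFmt p.2 p.1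
          (st.1 ++ pvSlice5 s 0, st.2.1 ++ pvSlice5 s 1, st.2.2.1 ++ pvSlice5 s 2,
           st.2.2.2.1 ++ pvSlice5 s 3, st.2.2.2.2 ++ pvSlice5 s 4)) ([], [], [], [], [])).2.1,
         st.2.2.1 ++ (l.foldl (fun (st : List Char × List Char × List Char × List Char × List Char) p =>
          let s := pvFmt p.2 p.1
          (st.1 ++ pvSlice5 s 0, st.2.1 ++ pvSlice5 s 1, st.2.2.1 ++ pvSlice5 s 2,
           st.2.2.2.1 ++ pvSlice5 s 3, st.2.2.2.2 ++ pvSlice5 s 4)) ([], [], [], [], [])).2.2.1,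
         st.2.2.2.1 ++ (l.foldl (fun (st : List Char × List Char × List Char × List Char × List Char) p =>
          let s := pvFmt p.2 p.1
          (st.1 ++ pvSlice5 s 0, st.2.1 ++ pvSlice5 s 1, st.2.2.1 ++ pvSlice5 s 2,
           st.2.2.2.1 ++ pvSlice5 s 3, st.2.2.2.2 ++ pvSlice5 s 4)) ([], [], [], [], [])).2.2.2.1,
         st.2.2.2.2 ++ (l.foldl (fun (st : List Char × List Char × List Char × List Char × List Char) p =>
          let s := pvFmt p.2 p.1
          (st.1 ++ pvSlice5 s 0, st.2.1 ++ pvSlice5 s 1, st.2.2.1 ++ pvSlice5 s 2,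
           st.2.2.2.1 ++ pvSlice5 s 3, st.2.2.2.2 ++ pvSlice5 s 4)) ([], [], [], [], [])).2.2.2.2) := by
  induction l with
  | nil => intro st; simp
  | cons p l ih =>
    intro st
    simp only [List.foldl_cons, List.nil_append]
    rw [ih (st.1 ++ pvSlice5 (pvFmt p.2 p.1) 0, st.2.1 ++ pvSlice5 (pvFmt p.2 p.1) 1,
           st.2.2.1 ++ pvSlice5 (pvFmt p.2 p.1) 2, st.2.2.2.1 ++ pvSlice5 (pvFmt p.2 p.1) 3,
           st.2.2.2.2 ++ pvSlice5 (pvFmt p.2 p.1) 4),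
        ih (pvSlice5 (pvFmt p.2 p.1) 0, pvSlice5 (pvFmt p.2 p.1) 1, pvSlice5 (pvFmt p.2 p.1) 2,
            pvSlice5 (pvFmt p.2 p.1) 3, pvSlice5 (pvFmt p.2 p.1) 4)]
    simp [List.append_assoc]

-- appending streams composes the lane folds (component form)
lemma pvF_append (t : Int × Int × Int × Int × Int) (b0 b1 b2 b3 b4 : List Char)
    (b' : List Char × List Char × List Char × List Char × List Char) :
    pvF t (b0 ++ b'.1, b1 ++ b'.2.1, b2 ++ b'.2.2.1, b3 ++ b'.2.2.2.1, b4 ++ b'.2.2.2.2)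
      = pvF (pvF t (b0, b1, b2, b3, b4)) b' := by
  simp [pvF, List.foldl_append]

-- main loop correspondence
lemma pvMain (l : List (Int × (String × String))) :
    ∀ (t : Int × Int × Int × Int × Int),
    l.foldl (fun acc p =>
        (PySem.List.enumerate (pvFmt p.2 p.1) 0).foldl
          (fun acc q => pvSet acc (PySem.Int.mod q.1 5) (fun a => pvStep a q.2)) acc) t
      = pvF t (l.foldl (fun (st : List Char × List Char × List Char × List Char × List Char) p =>
          let s := pvFmt p.2 p.1
          (st.1 ++ pvSlice5 s 0, st.2.1 ++ pvSlice5 s 1, st.2.2.1 ++ pvSlice5 s 2,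
           st.2.2.2.1 ++ pvSlice5 s 3, st.2.2.2.2 ++ pvSlice5 s 4)) ([], [], [], [], [])) := by
  induction l with
  | nil => intro t; simp [pvF]
  | cons p l ih =>
    intro t
    simp only [List.foldl_cons, List.nil_append]
    rw [ih]
    rw [pvStreams_shift l (pvSlice5 (pvFmt p.2 p.1) 0, pvSlice5 (pvFmt p.2 p.1) 1,
        pvSlice5 (pvFmt p.2 p.1) 2, pvSlice5 (pvFmt p.2 p.1) 3, pvSlice5 (pvFmt p.2 p.1) 4)]
    rw [pvF_append t (pvSlice5 (pvFmt p.2 p.1) 0) (pvSlice5 (pvFmt p.2 p.1) 1)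
        (pvSlice5 (pvFmt p.2 p.1) 2) (pvSlice5 (pvFmt p.2 p.1) 3) (pvSlice5 (pvFmt p.2 p.1) 4)]
    congr 1
    have h0 : (PySem.List.enumerate (pvFmt p.2 p.1) ((0 : Nat) : Int)).foldl
        (fun acc q => pvSet acc (PySem.Int.mod q.1 5) (fun a => pvStep a q.2)) t
        = pvF t (pvPickP 0 0 (pvFmt p.2 p.1), pvPickP 1 0 (pvFmt p.2 p.1),
                 pvPickP 2 0 (pvFmt p.2 p.1), pvPickP 3 0 (pvFmt p.2 p.1),
                 pvPickP 4 0 (pvFmt p.2 p.1)) := pvInner_eq _ 0 t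
    simp only [Nat.cast_zero] at h0
    rw [h0]
    congr 1
    have hp : ∀ m : Nat, m < 5 → pvPickP m 0 (pvFmt p.2 p.1) = pvSlice5 (pvFmt p.2 p.1) (m : Int) := by
      intro m hm
      rw [pvPickP_eq_slice _ m hm 0]
      congr 1
      omega
    have e0 := hp 0 (by omega); have e1 := hp 1 (by omega); have e2 := hp 2 (by omega)
    have e3 := hp 3 (by omega); have e4 := hp 4 (by omega)
    simp only [Nat.cast_ofNat, Nat.cast_zero, Nat.cast_one] at e0 e1 e2 e3 e4
    rw [e0, e1, e2, e3, e4]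

-- ===== VERDICT (by name: the statement is the Claim_ definition above) =====
theorem content_signature_py_spec : Claim_equal_content_signature_py := by
  intro payload _
  unfold Spec_content_signature_py content_signature_py content_signature_py_alt
  rw [pvMain]
  rfl
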